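-- pv_equiv track=rewrite | github.com/vishak199/MyScripts | scripts/DXC_MFI_ITSM_REPORTING_DB_SYNC.py | identify_record_type
-- ===== SOURCE A (Python) =====
-- NEW_ROWS_IDENTIFIER = [
--     'ADD_RELATION',
--     'ADD_ENTITY',
-- ]
--
-- UPDATE_ROW_IDENTIFIER = [
--     'UPDATE_ENTITY',
-- ]
--
-- REMOVE_ROW_IDENTIFER = [
--     'REMOVE_ENTITY',
--     'REMOVE_RELATION'
-- ]
--
-- def identify_record_type(rows):
--     """
--     Identify the records type
--     """
--     new_and_update_rows = []
--     # update_rows = []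
--     delete_rows = []
--
--     for row in rows:
--         if 'BiSyncOperation' in row:
--             if row['BiSyncOperation'] in NEW_ROWS_IDENTIFIER:
--                 new_and_update_rows.append(row)
--             elif row['BiSyncOperation'] in UPDATE_ROW_IDENTIFIER:
--                 new_and_update_rows.append(row)
--             elif row['BiSyncOperation'] in REMOVE_ROW_IDENTIFER:
--                 delete_rows.append(row)
--         else:
--             new_and_update_rows.append(row)
--     return new_and_update_rows, delete_rows
-- ===== SOURCE B (Python) =====
-- NEW_ROWS_IDENTIFIER = [
--     'ADD_RELATION',
--     'ADD_ENTITY',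
-- ]
--
-- UPDATE_ROW_IDENTIFIER = [
--     'UPDATE_ENTITY',
-- ]
--
-- REMOVE_ROW_IDENTIFER = [
--     'REMOVE_ENTITY',
--     'REMOVE_RELATION'
-- ]
--
-- def identify_record_type(rows):
--     """Identify the records type (two independent filter passes)."""
--     keep_ops = NEW_ROWS_IDENTIFIER + UPDATE_ROW_IDENTIFIER
--     new_and_update_rows = [r for r in rows
--                            if 'BiSyncOperation' not in r
--                            or r['BiSyncOperation'] in keep_ops]
--     delete_rows = [r for r in rows
--                    if 'BiSyncOperation' in r
--                    and r['BiSyncOperation'] in REMOVE_ROW_IDENTIFER]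
--     return new_and_update_rows, delete_rows
-- ===== Notes on version B (the rewrite author's own statement) =====
-- stated objective: simpler
-- what changed: Replaced the single stateful loop with two double-append accumulators by two independent declarative filter passes (one per output list), the keep-predicate merging the new and update identifier lists.
import Mathlib
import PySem

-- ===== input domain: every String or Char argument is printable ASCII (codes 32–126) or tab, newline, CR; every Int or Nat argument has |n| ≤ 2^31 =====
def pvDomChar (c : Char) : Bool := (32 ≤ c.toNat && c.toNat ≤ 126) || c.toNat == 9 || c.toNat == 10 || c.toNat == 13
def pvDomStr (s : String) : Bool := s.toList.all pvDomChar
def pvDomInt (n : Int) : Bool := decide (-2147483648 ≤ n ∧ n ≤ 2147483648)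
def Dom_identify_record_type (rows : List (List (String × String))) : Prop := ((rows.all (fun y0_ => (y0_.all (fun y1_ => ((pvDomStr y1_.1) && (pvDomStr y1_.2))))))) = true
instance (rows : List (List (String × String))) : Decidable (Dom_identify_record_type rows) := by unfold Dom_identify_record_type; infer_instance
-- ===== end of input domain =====

-- B changes: the single branching loop of A becomes two independent filter passes, one per
-- output list (objective: simpler).  Shared helper: Python-dict first-match lookup.
def pvGetOp (row : List (String × String)) : Option String :=
  match row with
  | [] => none
  | (k, v) :: rest => if k == "BiSyncOperation" then some v else pvGetOp rest

-- ===== PORT A =====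
-- literal transliteration of A's loop: two growing accumulators, branch order as in A
def identify_record_type (rows : List (List (String × String))) : (List (List (String × String))) × (List (List (String × String))) :=
  rows.foldl (fun acc row =>
    match pvGetOp row with
    | some op =>
        if (["ADD_RELATION", "ADD_ENTITY"]).contains op then (acc.1 ++ [row], acc.2)
        else if (["UPDATE_ENTITY"]).contains op then (acc.1 ++ [row], acc.2)
        else if (["REMOVE_ENTITY", "REMOVE_RELATION"]).contains op then (acc.1, acc.2 ++ [row])
        else acc
    | none => (acc.1 ++ [row], acc.2)) ([], [])

-- ===== PORT B =====
def identify_record_type_alt (rows : List (List (String × String))) : (List (List (String × String))) × (List (List (String × String))) :=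
  (rows.filter (fun r =>
      match pvGetOp r with
      | none => true
      | some op => (["ADD_RELATION", "ADD_ENTITY"] ++ ["UPDATE_ENTITY"]).contains op),
   rows.filter (fun r =>
      match pvGetOp r with
      | none => false
      | some op => (["REMOVE_ENTITY", "REMOVE_RELATION"]).contains op))

-- ===== PRECONDITION & SPEC =====
def Spec_identify_record_type (rows : List (List (String × String))) (out : (List (List (String × String))) × (List (List (String × String)))) : Prop := out = identify_record_type_alt rows
instance (rows : List (List (String × String))) (out : (List (List (String × String))) × (List (List (String × String)))) : Decidable (Spec_identify_record_type rows out) := by unfold Spec_identify_record_type; infer_instance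

-- ===== CLAIM (what is proved, stated in full; the proofs are below) =====
def Claim_equal_identify_record_type : Prop := ∀ (rows : List (List (String × String))), Dom_identify_record_type rows → Spec_identify_record_type rows (identify_record_type rows)

-- ===== LEMMAS AND PROOFS =====

-- loop invariant: A's fold from any accumulator appends exactly B's two filters
theorem pv_fold_filter (rows : List (List (String × String)))
    (a b : List (List (String × String))) :
    rows.foldl (fun acc row =>
      match pvGetOp row with
      | some op =>
          if (["ADD_RELATION", "ADD_ENTITY"]).contains op then (acc.1 ++ [row], acc.2)
          else if (["UPDATE_ENTITY"]).contains op then (acc.1 ++ [row], acc.2)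
          else if (["REMOVE_ENTITY", "REMOVE_RELATION"]).contains op then (acc.1, acc.2 ++ [row])
          else acc
      | none => (acc.1 ++ [row], acc.2)) (a, b)
    = (a ++ rows.filter (fun r =>
         match pvGetOp r with
         | none => true
         | some op => (["ADD_RELATION", "ADD_ENTITY"] ++ ["UPDATE_ENTITY"]).contains op),
       b ++ rows.filter (fun r =>
         match pvGetOp r with
         | none => false
         | some op => (["REMOVE_ENTITY", "REMOVE_RELATION"]).contains op)) := by
  induction rows generalizing a b with
  | nil => simp
  | cons r rs ih =>
    rw [List.foldl_cons]
    simp only [List.filter_cons]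
    rcases h : pvGetOp r with _ | op
    · simp only []
      rw [ih]
      simp
    · simp only []
      by_cases h1 : (["ADD_RELATION", "ADD_ENTITY"]).contains op <;>
      by_cases h2 : (["UPDATE_ENTITY"]).contains op <;>
      by_cases h3 : (["REMOVE_ENTITY", "REMOVE_RELATION"]).contains op
      all_goals simp only [h1, h2, h3, if_true, if_false, Bool.false_eq_true]
      all_goals try (rw [ih]; simp_all [List.contains_eq_mem])
      all_goals rcases h1 with rfl | rfl <;> rcases h3 with h3 | h3 <;>
        exact absurd h3 (by decide)

-- ===== VERDICT (by name: the statement is the Claim_ definition above) =====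
theorem identify_record_type_spec : Claim_equal_identify_record_type := by
  intro rows _
  unfold Spec_identify_record_type identify_record_type identify_record_type_alt
  simpa using pv_fold_filter rows [] []
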